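-- pv_equiv track=rewrite | github.com/EunNamCho/Algorithms | Programmers/[1차] 뉴스 클러스터링.py | make_bigrams
-- ===== SOURCE A (Python) =====
-- from collections import Counter
--
-- def make_bigrams(s: str) -> Counter:
--     s = s.lower()
--     cnt = Counter()
--     for i in range(len(s) - 1):
--         a, b = s[i], s[i + 1]
--         if a.isalpha() and b.isalpha():   # 영문자 쌍만
--             cnt[a + b] += 1
--     return cnt
-- ===== SOURCE B (Python) =====
-- from collections import Counter
-- from itertools import groupby
--
-- def make_bigrams(s: str) -> Counter:
--     # Stage 1: split the lowercased string into maximal runs keyed by isalpha;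
--     # Stage 2: count the adjacent pairs inside each alphabetic run (no per-pair
--     # guard needed: counted bigrams are exactly the internal pairs of such runs).
--     cnt = Counter()
--     for is_alpha, grp in groupby(s.lower(), key=str.isalpha):
--         if is_alpha:
--             run = list(grp)
--             for x, y in zip(run, run[1:]):
--                 cnt[x + y] += 1
--     return cnt
-- ===== Notes on version B (the rewrite author's own statement) =====
-- stated objective: alternative
-- what changed: Replaced the flat index scan with a per-pair double isalpha guard by a two-stage segment-then-count structure: itertools.groupby splits the lowercased string into maximal alphabetic runs, and an inner loop counts the adjacent pairs of each run without any guard.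
import Mathlib
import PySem

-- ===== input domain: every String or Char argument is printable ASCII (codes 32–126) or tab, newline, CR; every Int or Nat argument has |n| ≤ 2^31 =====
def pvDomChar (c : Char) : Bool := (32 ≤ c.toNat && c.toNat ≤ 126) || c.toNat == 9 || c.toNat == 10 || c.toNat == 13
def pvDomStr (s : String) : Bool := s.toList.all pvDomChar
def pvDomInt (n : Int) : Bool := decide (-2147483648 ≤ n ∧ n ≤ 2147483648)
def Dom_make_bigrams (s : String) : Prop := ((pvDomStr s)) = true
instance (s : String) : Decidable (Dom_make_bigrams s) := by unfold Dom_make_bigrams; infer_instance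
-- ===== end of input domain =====

-- B replaces A's flat index scan with a double per-pair isalpha guard by a two-stage
-- structure: split into maximal alphabetic runs, then count adjacent pairs inside each
-- run (objective: alternative; same asymptotic cost).

-- ===== PORT A =====
-- the loop body: a, b = s[i], s[i+1]; if a.isalpha() and b.isalpha(): cnt[a+b] += 1
def pvStepA (l : List Char) (cnt : PySem.Dict String Int) (i : Int) : PySem.Dict String Int :=
  match PySem.List.pyGet? l i, PySem.List.pyGet? l (i + 1) with
  | some a, some b =>
      if PySem.Chars.isalpha a && PySem.Chars.isalpha b then
        cnt.modify (String.ofList [a, b]) 0 (· + 1)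
      else cnt
  | _, _ => cnt   -- unreachable: i ∈ range(len-1)

def make_bigrams (s : String) : List (String × Int) :=
  ((PySem.List.pyRange 0 (((PySem.Str.lower s).toList.length : Int) - 1)).foldl
    (pvStepA (PySem.Str.lower s).toList) PySem.Dict.empty).items

-- ===== PORT B =====
-- groupby(key=isalpha), keeping only the alphabetic groups: the maximal alphabetic runs
def pvRuns : List Char → List (List Char)
  | [] => []
  | c :: t =>
      if PySem.Chars.isalpha c then
        (c :: t.takeWhile PySem.Chars.isalpha) :: pvRuns (t.dropWhile PySem.Chars.isalpha)
      else pvRuns t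
  termination_by l => l.length
  decreasing_by
  · have := t.length_dropWhile_le PySem.Chars.isalpha; simp; omega
  · simp

-- inner loop: for x, y in zip(run, run[1:]): cnt[x+y] += 1
def pvCountRun (cnt : PySem.Dict String Int) (run : List Char) : PySem.Dict String Int :=
  (run.zip run.tail).foldl (fun d p => d.modify (String.ofList [p.1, p.2]) 0 (· + 1)) cnt

def make_bigrams_alt (s : String) : List (String × Int) :=
  ((pvRuns (PySem.Str.lower s).toList).foldl pvCountRun PySem.Dict.empty).items

-- ===== PRECONDITION & SPEC =====
def Spec_make_bigrams (s : String) (out : List (String × Int)) : Prop := out = make_bigrams_alt s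
instance (s : String) (out : List (String × Int)) : Decidable (Spec_make_bigrams s out) := by unfold Spec_make_bigrams; infer_instance

-- ===== CLAIM (what is proved, stated in full; the proofs are below) =====
def Claim_equal_make_bigrams : Prop := ∀ (s : String), Dom_make_bigrams s → Spec_make_bigrams s (make_bigrams s)

-- ===== LEMMAS AND PROOFS =====

-- the list of bigrams A counts, in order
def pvBigrams : List Char → List String
  | a :: b :: t =>
      (if PySem.Chars.isalpha a && PySem.Chars.isalpha b then [String.ofList [a, b]] else [])
        ++ pvBigrams (b :: t)
  | _ => []

def pvCnt (bs : List String) (d : PySem.Dict String Int) : PySem.Dict String Int :=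
  bs.foldl (fun d s => d.modify s 0 (· + 1)) d

-- the bigrams B counts inside one run, in order
def pvInner (run : List Char) : List String :=
  (run.zip run.tail).map (fun p => String.ofList [p.1, p.2])

lemma pvCnt_append (xs ys : List String) (d : PySem.Dict String Int) :
    pvCnt (xs ++ ys) d = pvCnt ys (pvCnt xs d) := by
  simp [pvCnt, List.foldl_append]

lemma pvBigrams_cons_not_alpha (c : Char) (l : List Char)
    (h : PySem.Chars.isalpha c = false) : pvBigrams (c :: l) = pvBigrams l := by
  cases l with
  | nil => rfl
  | cons b t => simp [pvBigrams, h]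

lemma pvCountRun_eq (run : List Char) (d : PySem.Dict String Int) :
    pvCountRun d run = pvCnt (pvInner run) d := by
  simp [pvCountRun, pvInner, pvCnt, List.foldl_map]

-- B computes pvCnt of the concatenated inner bigrams of the runs
lemma pvB_eq (rs : List (List Char)) (d : PySem.Dict String Int) :
    rs.foldl pvCountRun d = pvCnt (rs.flatMap pvInner) d := by
  induction rs generalizing d with
  | nil => rfl
  | cons r t ih => simp [List.foldl_cons, pvCountRun_eq, List.flatMap_cons, pvCnt_append, ih]

-- peeling one alphabetic run off the front of the bigram list
lemma pvBigrams_run (t : List Char) (c : Char) (hc : PySem.Chars.isalpha c = true) :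
    pvBigrams (c :: t)
      = pvInner (c :: t.takeWhile PySem.Chars.isalpha)
          ++ pvBigrams (t.dropWhile PySem.Chars.isalpha) := by
  induction t generalizing c with
  | nil => simp [pvBigrams, pvInner]
  | cons b t ih =>
      by_cases hb : PySem.Chars.isalpha b = true
      · rw [show pvBigrams (c :: b :: t)
            = [String.ofList [c, b]] ++ pvBigrams (b :: t) by simp [pvBigrams, hc, hb]]
        rw [ih b hb]
        simp [hb, pvInner]
      · simp only [Bool.not_eq_true] at hb
        rw [show pvBigrams (c :: b :: t) = pvBigrams (b :: t) by simp [pvBigrams, hb],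
          pvBigrams_cons_not_alpha b t hb]
        simp [hb, pvInner, pvBigrams_cons_not_alpha b t hb]

-- the runs' inner bigrams, concatenated, are exactly A's bigram list
lemma pvRuns_flat_aux : ∀ (n : Nat) (l : List Char), l.length ≤ n →
    (pvRuns l).flatMap pvInner = pvBigrams l := by
  intro n
  induction n with
  | zero => intro l hl; rw [List.length_eq_zero_iff.mp (Nat.le_zero.mp hl)]; simp [pvRuns, pvBigrams]
  | succ n ih =>
      intro l hl
      match l with
      | [] => simp [pvRuns, pvBigrams]
      | c :: t =>
          by_cases hc : PySem.Chars.isalpha c = true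
          · rw [pvRuns, if_pos hc, List.flatMap_cons,
              ih (t.dropWhile PySem.Chars.isalpha)
                (by have := t.length_dropWhile_le PySem.Chars.isalpha; simp at hl; omega),
              pvBigrams_run t c hc]
          · simp only [Bool.not_eq_true] at hc
            rw [pvRuns, if_neg (by simp [hc]), ih t (by simp at hl; omega),
              pvBigrams_cons_not_alpha c t hc]

lemma pvRuns_flat (l : List Char) : (pvRuns l).flatMap pvInner = pvBigrams l :=
  pvRuns_flat_aux l.length l le_rfl

-- A computes the same thing: first move to Nat indices …
lemma pvA_range (l : List Char) (d : PySem.Dict String Int) :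
    (PySem.List.pyRange 0 ((l.length : Int) - 1)).foldl (pvStepA l) d
      = (List.range (l.length - 1)).foldl (fun d (i : Nat) => pvStepA l d (i : Int)) d := by
  cases l with
  | nil => rfl
  | cons a t =>
      rw [show (((a :: t).length : Int) - 1) = ((t.length : Nat) : Int) by simp,
        PySem.List.pyRange_zero_natCast, List.foldl_map]
      simp

lemma pvStepA_cast (l : List Char) (d : PySem.Dict String Int) (i : Nat)
    (hi : i + 1 < l.length) :
    pvStepA l d (i : Int)
      = if PySem.Chars.isalpha l[i] && PySem.Chars.isalpha l[i+1] then
          d.modify (String.ofList [l[i], l[i+1]]) 0 (· + 1)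
        else d := by
  have h1 : PySem.List.pyGet? l (i : Int) = some l[i] := by
    rw [PySem.List.pyGet?_natCast]; exact List.getElem?_eq_getElem (by omega)
  have h2 : PySem.List.pyGet? l ((i : Int) + 1) = some l[i+1] := by
    rw [show ((i : Int) + 1) = ((i + 1 : Nat) : Int) by push_cast; ring,
      PySem.List.pyGet?_natCast]
    exact List.getElem?_eq_getElem hi
  simp [pvStepA, h1, h2]

lemma pvA_eq (l : List Char) (d : PySem.Dict String Int) :
    (List.range (l.length - 1)).foldl (fun d (i : Nat) => pvStepA l d (i : Int)) d
      = pvCnt (pvBigrams l) d := by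
  induction l generalizing d with
  | nil => rfl
  | cons a t ih =>
      cases t with
      | nil => rfl
      | cons b u =>
          have hlen : (a :: b :: u).length - 1 = (b :: u).length := by simp
          rw [hlen]
          rw [show (b :: u).length = ((b :: u).length - 1) + 1 by simp,
            List.range_succ_eq_map, List.foldl_cons, List.foldl_map]
          have hstep : pvStepA (a :: b :: u) d ((0 : Nat) : Int)
              = pvCnt (if PySem.Chars.isalpha a && PySem.Chars.isalpha b
                  then [String.ofList [a, b]] else []) d := by
            rw [pvStepA_cast (a :: b :: u) d 0 (by simp)]
            simp only [List.getElem_cons_zero, List.getElem_cons_succ, Bool.and_eq_true]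
            split_ifs <;> simp [pvCnt]
          have hshift : ∀ (d' : PySem.Dict String Int),
              (List.range ((b :: u).length - 1)).foldl
                (fun d (i : Nat) => pvStepA (a :: b :: u) d ((i.succ : Nat) : Int)) d'
              = (List.range ((b :: u).length - 1)).foldl
                (fun d (i : Nat) => pvStepA (b :: u) d ((i : Nat) : Int)) d' := by
            intro d'
            apply PySem.List.foldl_congr_mem
            intro acc i hi
            have hi' : i + 1 < (b :: u).length := by
              have := List.mem_range.mp hi
              simp only [List.length_cons] at this ⊢; omega
            rw [show ((i.succ : Nat) : Int) = ((i + 1 : Nat) : Int) by rfl]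
            rw [pvStepA_cast (a :: b :: u) acc (i + 1) (by simpa using hi'),
              pvStepA_cast (b :: u) acc i hi']
            simp
          rw [hstep, hshift, ih]
          rw [show pvBigrams (a :: b :: u)
              = (if PySem.Chars.isalpha a && PySem.Chars.isalpha b
                  then [String.ofList [a, b]] else []) ++ pvBigrams (b :: u) from rfl]
          rw [pvCnt_append]

-- ===== VERDICT (by name: the statement is the Claim_ definition above) =====
theorem make_bigrams_spec : Claim_equal_make_bigrams := by
  intro s _
  unfold Spec_make_bigrams make_bigrams make_bigrams_alt
  rw [pvA_range, pvA_eq, pvB_eq, pvRuns_flat]
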